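-- pv_equiv track=rewrite | github.com/LAB1/TagTracker | code_v2/build_all.py | hist_seg
-- ===== SOURCE A (Python) =====
-- def hist_seg(hist):
--     ranges = []
--     start = 0
--     state = 0
--     count = 0
--     for i in range(len(hist)):
--         if state == 0:
--             if hist[i] <= 0:
--                 continue
--             else:
--                 start = i
--                 state = 1
--                 count += hist[i]
--         elif state == 1:
--             if hist[i] > 0:
--                 count += hist[i]
--             else:
--                 if count >= 64:
--                     end = i
--                     ranges.append((start,end))
--                     state = 0
--                     count = 0
--                 else:
--                     state = 0
--                     count = 0
--     return ranges
-- ===== SOURCE B (Python) =====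
-- def hist_seg(hist):
--     prev = [0] + hist[:-1]
--     starts = [i for i, (p, x) in enumerate(zip(prev, hist)) if p <= 0 and x > 0]
--     ends = [i for i, (p, x) in enumerate(zip(prev, hist)) if p > 0 and x <= 0]
--     return [(s, e) for s, e in zip(starts, ends) if sum(hist[s:e]) >= 64]
-- ===== Notes on version B (the rewrite author's own statement) =====
-- stated objective: alternative
-- what changed: Replaces A's one-pass state machine (explicit state/count variables) by building the lists of run-start and run-end indices with two filtered enumerations over predecessor pairs, zipping them into candidate segments (zip truncation naturally drops an unterminated trailing run, as A does), and keeping those whose slice sum is >= 64.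
import Mathlib
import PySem

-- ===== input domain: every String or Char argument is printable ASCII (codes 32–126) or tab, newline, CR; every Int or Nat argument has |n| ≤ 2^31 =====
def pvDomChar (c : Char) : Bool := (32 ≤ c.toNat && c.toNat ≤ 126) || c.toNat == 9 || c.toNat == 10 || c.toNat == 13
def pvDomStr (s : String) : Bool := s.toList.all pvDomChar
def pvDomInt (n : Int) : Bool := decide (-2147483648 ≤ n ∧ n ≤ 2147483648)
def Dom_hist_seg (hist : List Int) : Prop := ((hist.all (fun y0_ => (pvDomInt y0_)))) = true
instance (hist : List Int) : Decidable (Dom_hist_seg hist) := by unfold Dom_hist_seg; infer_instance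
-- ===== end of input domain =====

-- B replaces A's explicit state machine by two filtered index lists (run starts / run ends)
-- zipped together and filtered by the slice sum; objective: alternative decomposition.

-- ===== PORT A =====
-- loop body of A's for-loop, state = (ranges, start, state, count)
def histStepA (acc : List (Int × Int) × Int × Int × Int) (q : Int × Int) :
    List (Int × Int) × Int × Int × Int :=
  let (ranges, start, state, count) := acc
  let (i, x) := q
  if state = 0 then
    if x ≤ 0 then (ranges, start, state, count)
    else (ranges, i, 1, count + x)
  else
    if 0 < x then (ranges, start, state, count + x)
    else if 64 ≤ count then (ranges ++ [(start, i)], start, 0, 0)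
    else (ranges, start, 0, 0)

def hist_seg (hist : List Int) : List (Int × Int) :=
  ((PySem.List.enumerate hist 0).foldl histStepA ([], 0, 0, 0)).1

-- ===== PORT B =====
def hist_seg_alt (hist : List Int) : List (Int × Int) :=
  let prev : List Int := 0 :: PySem.List.slice hist none (some (-1))
  let pairs := PySem.List.enumerate (prev.zip hist) 0
  let starts := (pairs.filter (fun q => decide (q.2.1 ≤ 0 ∧ 0 < q.2.2))).map (·.1)
  let ends := (pairs.filter (fun q => decide (0 < q.2.1 ∧ q.2.2 ≤ 0))).map (·.1)
  (starts.zip ends).filter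
    (fun q => decide (64 ≤ (PySem.List.slice hist (some q.1) (some q.2)).sum))

-- ===== PRECONDITION & SPEC =====
def Spec_hist_seg (hist : List Int) (out : List (Int × Int)) : Prop := out = hist_seg_alt hist
instance (hist : List Int) (out : List (Int × Int)) : Decidable (Spec_hist_seg hist out) := by unfold Spec_hist_seg; infer_instance

-- ===== CLAIM (what is proved, stated in full; the proofs are below) =====
def Claim_equal_hist_seg : Prop := ∀ (hist : List Int), Dom_hist_seg hist → Spec_hist_seg hist (hist_seg hist)

-- ===== LEMMAS AND PROOFS =====

-- common reference machine: st = none (outside a run) / some (s0, count) (inside a run)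
def goHS (st : Option (Int × Int)) (k : Int) : List Int → List (Int × Int)
  | [] => []
  | x :: t =>
    match st with
    | none => if x ≤ 0 then goHS none (k+1) t else goHS (some (k, x)) (k+1) t
    | some (s0, c) =>
      if 0 < x then goHS (some (s0, c + x)) (k+1) t
      else (if 64 ≤ c then [(s0, k)] else []) ++ goHS none (k+1) t

-- pairing each element with its predecessor (c = value before the list)
def ppHS (c : Int) : List Int → List (Int × Int)
  | [] => []
  | x :: t => (c, x) :: ppHS x t

-- run-start / run-end index lists
def SxHS (k c : Int) : List Int → List Int
  | [] => []
  | x :: t => if c ≤ 0 ∧ 0 < x then k :: SxHS (k+1) x t else SxHS (k+1) x t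

def ExHS (k c : Int) : List Int → List Int
  | [] => []
  | x :: t => if 0 < c ∧ x ≤ 0 then k :: ExHS (k+1) x t else ExHS (k+1) x t

lemma zip_prev_eq_ppHS (l : List Int) : ∀ c : Int, (c :: l.dropLast).zip l = ppHS c l := by
  induction l with
  | nil => intro c; simp [ppHS]
  | cons x t ih =>
    intro c
    cases t with
    | nil => simp [ppHS]
    | cons y t' => simpa [ppHS] using ih x

lemma starts_eq_SxHS (l : List Int) : ∀ c k : Int,
    ((PySem.List.enumerate (ppHS c l) k).filter
      (fun q => decide (q.2.1 ≤ 0 ∧ 0 < q.2.2))).map (·.1) = SxHS k c l := by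
  induction l with
  | nil => intro c k; simp [ppHS, SxHS, PySem.List.enumerate_nil]
  | cons x t ih =>
    intro c k
    rw [show ppHS c (x :: t) = (c, x) :: ppHS x t from rfl, PySem.List.enumerate_cons]
    by_cases h : c ≤ 0 ∧ 0 < x
    · rw [List.filter_cons_of_pos (by simpa using h), List.map_cons, ih x (k+1)]
      simp only [SxHS, if_pos h]
    · rw [List.filter_cons_of_neg (by simpa using h), ih x (k+1)]
      simp only [SxHS, if_neg h]

lemma ends_eq_ExHS (l : List Int) : ∀ c k : Int,
    ((PySem.List.enumerate (ppHS c l) k).filter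
      (fun q => decide (0 < q.2.1 ∧ q.2.2 ≤ 0))).map (·.1) = ExHS k c l := by
  induction l with
  | nil => intro c k; simp [ppHS, ExHS, PySem.List.enumerate_nil]
  | cons x t ih =>
    intro c k
    rw [show ppHS c (x :: t) = (c, x) :: ppHS x t from rfl, PySem.List.enumerate_cons]
    by_cases h : 0 < c ∧ x ≤ 0
    · rw [List.filter_cons_of_pos (by simpa using h), List.map_cons, ih x (k+1)]
      simp only [ExHS, if_pos h]
    · rw [List.filter_cons_of_neg (by simpa using h), ih x (k+1)]
      simp only [ExHS, if_neg h]

-- A's fold equals the reference machine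
lemma foldA_eq_goHS (l : List Int) : ∀ (k : Int) (acc : List (Int × Int)) (s0 : Int),
    (((PySem.List.enumerate l k).foldl histStepA (acc, s0, 0, 0)).1 = acc ++ goHS none k l)
    ∧ ∀ c : Int, ((PySem.List.enumerate l k).foldl histStepA (acc, s0, 1, c)).1
        = acc ++ goHS (some (s0, c)) k l := by
  induction l with
  | nil => intro k acc s0; simp [goHS, PySem.List.enumerate_nil]
  | cons x t ih =>
    intro k acc s0
    constructor
    · by_cases hx : x ≤ 0
      · simpa [goHS, hx, PySem.List.enumerate_cons, histStepA] using (ih (k+1) acc s0).1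
      · simpa [goHS, hx, PySem.List.enumerate_cons, histStepA] using ((ih (k+1) acc k).2 x)
    · intro c
      by_cases hx : 0 < x
      · simpa [goHS, hx, PySem.List.enumerate_cons, histStepA] using ((ih (k+1) acc s0).2 (c+x))
      · by_cases hc : 64 ≤ c
        · simpa [goHS, hx, hc, PySem.List.enumerate_cons, histStepA]
            using (ih (k+1) (acc ++ [(s0, k)]) s0).1
        · simpa [goHS, hx, hc, PySem.List.enumerate_cons, histStepA] using (ih (k+1) acc s0).1

lemma slice_snoc (hist : List Int) (s0 k : Int) (x : Int) (t : List Int)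
    (hs : 0 ≤ s0) (hsk : s0 ≤ k) (hd : hist.drop k.toNat = x :: t) :
    PySem.List.slice hist (some s0) (some (k + 1))
      = PySem.List.slice hist (some s0) (some k) ++ [x] := by
  have hk : (0:Int) ≤ k := le_trans hs hsk
  rw [PySem.List.slice_toNat hist hs hk, PySem.List.slice_toNat hist hs (by omega)]
  have h1 : (k + 1).toNat = k.toNat + 1 := by omega
  have hmem : hist[k.toNat]? = some x := by
    have h0 : (hist.drop k.toNat)[0]? = some x := by rw [hd]; rfl
    rw [List.getElem?_drop] at h0
    simpa using h0
  have h2 : k.toNat + 1 - s0.toNat = (k.toNat - s0.toNat) + 1 := by omega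
  rw [h1, h2, List.take_add_one]
  have h3 : (hist.drop s0.toNat)[k.toNat - s0.toNat]? = some x := by
    rw [List.getElem?_drop, show s0.toNat + (k.toNat - s0.toNat) = k.toNat from by omega, hmem]
  simp [h3]

-- B's zip/filter equals the reference machine
lemma zipfilter_eq_goHS (hist : List Int) (l : List Int) : ∀ (k : Int), 0 ≤ k →
    hist.drop k.toNat = l →
    (∀ c : Int, c ≤ 0 →
      ((SxHS k c l).zip (ExHS k c l)).filter
        (fun q => decide (64 ≤ (PySem.List.slice hist (some q.1) (some q.2)).sum))
      = goHS none k l)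
    ∧ (∀ c s0 cnt : Int, 0 < c → 0 ≤ s0 → s0 ≤ k →
        cnt = (PySem.List.slice hist (some s0) (some k)).sum →
      ((s0 :: SxHS k c l).zip (ExHS k c l)).filter
        (fun q => decide (64 ≤ (PySem.List.slice hist (some q.1) (some q.2)).sum))
      = goHS (some (s0, cnt)) k l) := by
  induction l with
  | nil =>
    intro k hk hd
    constructor
    · intro c hc; simp [SxHS, ExHS, goHS]
    · intro c s0 cnt hc hs hsk hcnt; simp [SxHS, ExHS, goHS]
  | cons x t ih =>
    intro k hk hd
    have hd' : hist.drop (k+1).toNat = t := by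
      have h1 : (k + 1).toNat = k.toNat + 1 := by omega
      rw [h1, ← List.drop_drop, hd]; simp
    have ihh := ih (k+1) (by omega) hd'
    constructor
    · intro c hc
      by_cases hx : x ≤ 0
      · have : ¬ (c ≤ 0 ∧ 0 < x) := by omega
        have h2 : ¬ (0 < c ∧ x ≤ 0) := by omega
        simp only [SxHS, ExHS, goHS, this, h2, if_pos hx]
        exact ihh.1 x hx
      · push Not at hx
        have h1 : c ≤ 0 ∧ 0 < x := ⟨hc, hx⟩
        have h2 : ¬ (0 < c ∧ x ≤ 0) := by omega
        simp only [SxHS, ExHS, goHS, if_pos h1, if_neg h2, if_neg (by omega : ¬ x ≤ 0)]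
        refine ihh.2 x k x hx hk (by omega) ?_
        rw [slice_snoc hist k k x t hk le_rfl hd]
        have : PySem.List.slice hist (some k) (some k) = [] := by
          rw [PySem.List.slice_toNat hist hk hk]; simp
        simp [this]
    · intro c s0 cnt hc hs hsk hcnt
      by_cases hx : 0 < x
      · have h1 : ¬ (c ≤ 0 ∧ 0 < x) := by omega
        have h2 : ¬ (0 < c ∧ x ≤ 0) := by omega
        simp only [SxHS, ExHS, goHS, if_neg h1, if_neg h2, if_pos hx]
        refine ihh.2 x s0 (cnt + x) hx hs (by omega) ?_
        rw [slice_snoc hist s0 k x t hs hsk hd, List.sum_append, hcnt]; simp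
      · push Not at hx
        have h1 : ¬ (c ≤ 0 ∧ 0 < x) := by omega
        have h2 : 0 < c ∧ x ≤ 0 := ⟨hc, hx⟩
        simp only [SxHS, ExHS, goHS, if_neg h1, if_pos h2, if_neg (by omega : ¬ 0 < x)]
        rw [List.zip_cons_cons, List.filter_cons]
        have htail := ihh.1 x hx
        by_cases h64 : 64 ≤ cnt
        · have : decide (64 ≤ (PySem.List.slice hist (some s0) (some k)).sum) = true := by
            simp [← hcnt, h64]
          simp [this, htail, h64]
        · have : decide (64 ≤ (PySem.List.slice hist (some s0) (some k)).sum) = false := by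
            simp [← hcnt]; omega
          simp [this, htail, h64]

-- ===== VERDICT (by name: the statement is the Claim_ definition above) =====
theorem hist_seg_spec : Claim_equal_hist_seg := by
  intro hist _
  unfold Spec_hist_seg
  have hA : hist_seg hist = goHS none 0 hist := by
    unfold hist_seg
    simpa using (foldA_eq_goHS hist 0 [] 0).1
  have hB : hist_seg_alt hist = goHS none 0 hist := by
    unfold hist_seg_alt
    simp only [PySem.List.slice_to_neg_one]
    rw [zip_prev_eq_ppHS hist 0, starts_eq_SxHS hist 0 0, ends_eq_ExHS hist 0 0]
    exact (zipfilter_eq_goHS hist hist 0 le_rfl (by simp)).1 0 le_rfl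
  rw [hA, hB]
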